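-- pv_equiv track=rewrite | github.com/zeroQiaoba/MERTools | MER2026/MER2026_Track2/my_affectgpt/evaluation/wheel.py | func_backward_case3
-- ===== SOURCE A (Python) =====
-- def func_backward_case3(label, format_mapping, raw_mapping, wheel_map):
--     if label not in format_mapping:
--         return ""
--
--     level1_whole = []
--     for format in format_mapping[label]:
--         for raw in raw_mapping[format]:
--             level1_whole.append(raw)
--
--     for level1 in sorted(level1_whole): # 保证了结果唯一性
--         if level1 in wheel_map:
--             return wheel_map[level1]
--     return ""
-- ===== SOURCE B (Python) =====
-- def func_backward_case3(label, format_mapping, raw_mapping, wheel_map):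
--     if label not in format_mapping:
--         return ""
--     level1_whole = []
--     for format in format_mapping[label]:
--         for raw in raw_mapping[format]:
--             level1_whole.append(raw)
--     candidates = [raw for raw in level1_whole if raw in wheel_map]
--     if candidates:
--         return wheel_map[min(candidates)]
--     return ""
-- ===== Notes on version B (the rewrite author's own statement) =====
-- stated objective: simpler
-- what changed: Replaces sorting the whole candidate list and scanning it for the first wheel_map key by filtering to the wheel_map keys and taking their minimum with a single min() pass (no sort).
import Mathlib
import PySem

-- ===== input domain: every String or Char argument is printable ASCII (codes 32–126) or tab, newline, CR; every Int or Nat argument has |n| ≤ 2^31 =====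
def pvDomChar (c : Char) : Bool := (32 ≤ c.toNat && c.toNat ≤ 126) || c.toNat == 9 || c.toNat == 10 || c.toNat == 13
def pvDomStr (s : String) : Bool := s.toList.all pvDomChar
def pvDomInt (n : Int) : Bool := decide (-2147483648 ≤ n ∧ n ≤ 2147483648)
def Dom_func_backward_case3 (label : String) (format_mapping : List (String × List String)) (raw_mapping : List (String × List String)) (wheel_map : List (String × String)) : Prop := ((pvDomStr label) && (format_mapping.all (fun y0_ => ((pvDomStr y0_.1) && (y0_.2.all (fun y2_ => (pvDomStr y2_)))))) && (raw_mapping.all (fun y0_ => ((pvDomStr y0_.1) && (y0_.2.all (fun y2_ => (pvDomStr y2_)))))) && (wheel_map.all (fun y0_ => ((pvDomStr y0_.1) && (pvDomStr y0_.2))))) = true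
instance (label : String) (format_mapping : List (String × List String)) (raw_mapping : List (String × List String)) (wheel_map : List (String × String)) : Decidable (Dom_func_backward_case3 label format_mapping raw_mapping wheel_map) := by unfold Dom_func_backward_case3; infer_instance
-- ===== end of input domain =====

-- B replaces A's sort-then-scan (sort all raw labels, return wheel_map of the first one
-- that is a wheel_map key) by a filter + single min() pass: simpler, no sort.

-- ===== PORT A =====
-- the 'for level1 in sorted(level1_whole): if level1 in wheel_map: return wheel_map[level1]' loop
def aScan (wheel_map : List (String × String)) : List String → String
  | [] => ""
  | x :: rest =>
    match wheel_map.lookup x with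
    | some v => v
    | none => aScan wheel_map rest

def func_backward_case3 (label : String) (format_mapping : List (String × List String)) (raw_mapping : List (String × List String)) (wheel_map : List (String × String)) : String :=
  match format_mapping.lookup label with
  | none => ""
  | some fs =>
    let level1_whole := fs.foldl (fun acc f => acc ++ ((raw_mapping.lookup f).getD [])) []
    aScan wheel_map (PySem.List.sorted level1_whole (fun x => x) false)

-- ===== PORT B =====
def func_backward_case3_alt (label : String) (format_mapping : List (String × List String)) (raw_mapping : List (String × List String)) (wheel_map : List (String × String)) : String :=
  match format_mapping.lookup label with
  | none => ""
  | some fs =>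
    let level1_whole := fs.foldl (fun acc f => acc ++ ((raw_mapping.lookup f).getD [])) []
    let candidates := level1_whole.filter (fun raw => (wheel_map.lookup raw).isSome)
    match PySem.List.min? candidates (fun x => x) with
    | some m => (wheel_map.lookup m).getD ""
    | none => ""

-- ===== PRECONDITION & SPEC =====
-- Pre_ excludes exactly the inputs where some format listed under format_mapping[label]
-- is missing from raw_mapping: there Python A raises KeyError (and so does B).
def Pre_func_backward_case3 (label : String) (format_mapping : List (String × List String)) (raw_mapping : List (String × List String)) (wheel_map : List (String × String)) : Prop :=
  ((format_mapping.lookup label).getD []).all (fun f => (raw_mapping.lookup f).isSome) = true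
instance (label : String) (format_mapping : List (String × List String)) (raw_mapping : List (String × List String)) (wheel_map : List (String × String)) : Decidable (Pre_func_backward_case3 label format_mapping raw_mapping wheel_map) := by unfold Pre_func_backward_case3; infer_instance

def pvWitness_func_backward_case3 : String × (List (String × List String)) × (List (String × List String)) × (List (String × String)) :=
  ("happy", [("happy", ["joy", "glee"])], [("joy", ["smile", "laugh"]), ("glee", ["grin"])], [("laugh", "W1"), ("grin", "W2")])

def Spec_func_backward_case3 (label : String) (format_mapping : List (String × List String)) (raw_mapping : List (String × List String)) (wheel_map : List (String × String)) (out : String) : Prop := out = func_backward_case3_alt label format_mapping raw_mapping wheel_map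
instance (label : String) (format_mapping : List (String × List String)) (raw_mapping : List (String × List String)) (wheel_map : List (String × String)) (out : String) : Decidable (Spec_func_backward_case3 label format_mapping raw_mapping wheel_map out) := by unfold Spec_func_backward_case3; infer_instance

-- ===== CLAIM (what is proved, stated in full; the proofs are below) =====
def Claim_equal_func_backward_case3 : Prop := ∀ (label : String) (format_mapping : List (String × List String)) (raw_mapping : List (String × List String)) (wheel_map : List (String × String)), Dom_func_backward_case3 label format_mapping raw_mapping wheel_map → Pre_func_backward_case3 label format_mapping raw_mapping wheel_map → Spec_func_backward_case3 label format_mapping raw_mapping wheel_map (func_backward_case3 label format_mapping raw_mapping wheel_map)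

-- ===== LEMMAS AND PROOFS =====

-- A's scan returns the wheel value of the first list element that is a wheel_map key
lemma aScan_eq_find? (w : List (String × String)) (xs : List String) :
    aScan w xs =
      match xs.find? (fun x => (w.lookup x).isSome) with
      | some m => (w.lookup m).getD ""
      | none => "" := by
  induction xs with
  | nil => rfl
  | cons x rest ih =>
    simp only [aScan, List.find?]
    cases h : w.lookup x with
    | some v => simp [h]
    | none => simp [ih]

-- in a ≤-sorted list, the first element satisfying p is ≤ every element satisfying p
lemma find?_min_of_pairwise (p : String → Bool) (xs : List String)
    (hp : xs.Pairwise (fun a b => a ≤ b)) {m : String}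
    (hf : xs.find? p = some m) : ∀ y ∈ xs, p y = true → m ≤ y := by
  induction xs with
  | nil => simp at hf
  | cons a t ih =>
    rcases List.pairwise_cons.mp hp with ⟨ha, ht⟩
    by_cases hpa : p a = true
    · have hm : m = a := by simp [List.find?, hpa] at hf; exact hf.symm
      subst hm
      intro y hy hpy
      rcases List.mem_cons.mp hy with rfl | hyt
      · exact le_refl _
      · exact ha y hyt
    · have hf' : t.find? p = some m := by
        simpa [List.find?, hpa] using hf
      intro y hy hpy
      rcases List.mem_cons.mp hy with rfl | hyt
      · exact absurd hpy hpa
      · exact ih ht hf' y hyt hpy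

lemma main_lemma (w : List (String × String)) (l : List String) :
    aScan w (PySem.List.sorted l (fun x => x) false) =
      match PySem.List.min? (l.filter (fun raw => (w.lookup raw).isSome)) (fun x => x) with
      | some m => (w.lookup m).getD ""
      | none => "" := by
  set p : String → Bool := fun raw => (w.lookup raw).isSome with hp
  rw [aScan_eq_find?]
  cases hf : (PySem.List.sorted l (fun x => x) false).find? p with
  | none =>
    have hnone : ∀ x ∈ l, ¬ p x = true := by
      intro x hx
      exact List.find?_eq_none.mp hf x ((PySem.List.mem_sorted _ _ _ _).mpr hx)
    have hfil : l.filter p = [] := List.filter_eq_nil_iff.mpr hnone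
    rw [hfil]
    simp [PySem.List.min?]
  | some m =>
    have hm_mem : m ∈ l := (PySem.List.mem_sorted _ _ _ _).mp (List.mem_of_find?_eq_some hf)
    have hpm : p m = true := List.find?_some hf
    have hm_fil : m ∈ l.filter p := List.mem_filter.mpr ⟨hm_mem, hpm⟩
    cases hmin : PySem.List.min? (l.filter p) (fun x => x) with
    | none =>
      simp [(PySem.List.min?_eq_none_iff _ _).mp hmin] at hm_fil
    | some m' =>
      have hm'_fil : m' ∈ l.filter p := PySem.List.min?_mem hmin
      have h1 : m' ≤ m := PySem.List.min?_isMin hmin m hm_fil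
      have h2 : m ≤ m' := by
        refine find?_min_of_pairwise p _ ?_ hf m' ?_ (List.mem_filter.mp hm'_fil).2
        · exact PySem.List.sorted_pairwise l (fun x => x)
        · exact (PySem.List.mem_sorted _ _ _ _).mpr (List.mem_filter.mp hm'_fil).1
      rw [le_antisymm h2 h1]

-- ===== VERDICT (by name: the statement is the Claim_ definition above) =====
theorem func_backward_case3_spec : Claim_equal_func_backward_case3 := by
  intro label fm rm wm _ _
  unfold Spec_func_backward_case3 func_backward_case3 func_backward_case3_alt
  cases h : fm.lookup label with
  | none => rfl
  | some fs => simpa using main_lemma wm (fs.foldl (fun acc f => acc ++ ((rm.lookup f).getD [])) [])
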